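-- pv_equiv track=rewrite | github.com/krasiren/AdventOfCode | 2025/day 03/part1.py | bank_joltage
-- ===== SOURCE A (Python) =====
-- def bank_joltage(bank: str) -> int:
--     tenths, tenths_ix = 0, 0
--     for i, c in enumerate(bank[:-1]):
--         c = int(c)
--         if c > tenths:
--             tenths = c
--             tenths_ix = i
--         if c == 9:
--             break
--
--     ones = 0
--     for c in bank[tenths_ix + 1:]:
--         c = int(c)
--         if c > ones:
--             ones = c
--
--     return int(f'{tenths}{ones}')
-- ===== SOURCE B (Python) =====
-- def bank_joltage(bank: str) -> int:
--     n = len(bank)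
--     return max((10 * int(bank[i]) + int(bank[j])
--                 for i in range(n) for j in range(i + 1, n)),
--                default=0)
-- ===== Notes on version B (the rewrite author's own statement) =====
-- stated objective: alternative
-- what changed: B replaces A's two greedy linear scans (running max digit with pivot index, then max over the suffix) by a brute-force maximum of 10*digit[i]+digit[j] over all index pairs i<j, with default 0 when no pair exists.
import Mathlib
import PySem

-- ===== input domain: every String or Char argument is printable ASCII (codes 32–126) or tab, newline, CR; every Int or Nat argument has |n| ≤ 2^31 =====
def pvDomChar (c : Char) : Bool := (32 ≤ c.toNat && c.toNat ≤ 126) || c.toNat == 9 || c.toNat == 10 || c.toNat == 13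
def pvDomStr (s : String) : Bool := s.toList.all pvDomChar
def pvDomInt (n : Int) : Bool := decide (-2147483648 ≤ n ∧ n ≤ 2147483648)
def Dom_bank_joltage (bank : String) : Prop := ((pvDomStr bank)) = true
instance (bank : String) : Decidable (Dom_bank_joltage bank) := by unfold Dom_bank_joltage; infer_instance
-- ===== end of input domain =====

-- B is an alternative algorithm: the maximum of 10*digit[i]+digit[j] over all index pairs i<j
-- (default 0 when no pair exists), instead of A's two greedy scans; same value wherever A returns.

-- int(c) for a single digit character c — exact on '0'..'9', the only characters Pre_ admits
-- (on any other character int(c), and hence both Pythons, raise ValueError; excluded by Pre_).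
def pvDigit (c : Char) : Int := (c.toNat : Int) - 48

-- ===== PORT A =====
-- first loop: for i, c in enumerate(bank[:-1]): … with break at 9
def aLoop1 : List (Int × Char) → Int → Int → Int × Int
  | [], t, ti => (t, ti)
  | (i, c) :: rest, t, ti =>
    let cv := pvDigit c
    let t' := if t < cv then cv else t
    let ti' := if t < cv then i else ti
    if cv = 9 then (t', ti') else aLoop1 rest t' ti'

-- second loop: running max over bank[tenths_ix+1:]
def aLoop2 : List Char → Int → Int
  | [], o => o
  | c :: rest, o => aLoop2 rest (if o < pvDigit c then pvDigit c else o)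

def bank_joltage (bank : String) : Int :=
  let l := bank.toList
  let p := aLoop1 (PySem.List.enumerate (PySem.List.slice l none (some (-1)))) 0 0
  let o := aLoop2 (PySem.List.slice l (some (p.2 + 1)) none) 0
  ((PySem.Int.ofStr? (PySem.Int.toStr p.1 ++ PySem.Int.toStr o)).getD 0)  -- int(f'{tenths}{ones}')

-- ===== PORT B =====
def bank_joltage_alt (bank : String) : Int :=
  let l := bank.toList
  let n := l.length
  let vals := (List.range n).flatMap (fun i =>
    (List.range' (i + 1) (n - (i + 1))).map (fun j =>
      10 * pvDigit (l.getD i ' ') + pvDigit (l.getD j ' ')))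
  match vals with            -- max(…, default=0)
  | [] => 0
  | v :: vs => vs.foldl max v

-- ===== PRECONDITION & SPEC =====
-- Pre_ excludes exactly the inputs on which A raises ValueError: a string of length ≥ 2
-- containing a non-digit character (int(c) fails there; B raises on exactly those inputs too).
def Pre_bank_joltage (bank : String) : Prop :=
  bank.toList.length < 2 ∨ PySem.Str.strIsdigit bank = true

instance (bank : String) : Decidable (Pre_bank_joltage bank) := by
  unfold Pre_bank_joltage; infer_instance

def pvWitness_bank_joltage : String := "325"

def Spec_bank_joltage (bank : String) (out : Int) : Prop := out = bank_joltage_alt bank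
instance (bank : String) (out : Int) : Decidable (Spec_bank_joltage bank out) := by unfold Spec_bank_joltage; infer_instance

-- ===== CLAIM (what is proved, stated in full; the proofs are below) =====
def Claim_equal_bank_joltage : Prop := ∀ (bank : String), Dom_bank_joltage bank → Pre_bank_joltage bank → Spec_bank_joltage bank (bank_joltage bank)

-- ===== LEMMAS AND PROOFS =====

-- the bodies of the two ports as functions of the character list
def aBody (l : List Char) : Int :=
  let p := aLoop1 (PySem.List.enumerate (PySem.List.slice l none (some (-1)))) 0 0
  let o := aLoop2 (PySem.List.slice l (some (p.2 + 1)) none) 0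
  ((PySem.Int.ofStr? (PySem.Int.toStr p.1 ++ PySem.Int.toStr o)).getD 0)

def bBody (l : List Char) : Int :=
  let n := l.length
  let vals := (List.range n).flatMap (fun i =>
    (List.range' (i + 1) (n - (i + 1))).map (fun j =>
      10 * pvDigit (l.getD i ' ') + pvDigit (l.getD j ' ')))
  match vals with
  | [] => 0
  | v :: vs => vs.foldl max v

theorem bank_joltage_eq_aBody (bank : String) : bank_joltage bank = aBody bank.toList := rfl
theorem bank_joltage_alt_eq_bBody (bank : String) : bank_joltage_alt bank = bBody bank.toList := rfl

theorem pvDigit_of_isDigit {c : Char} (h : c.isDigit) : 0 ≤ pvDigit c ∧ pvDigit c ≤ 9 := by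
  simp [Char.isDigit, UInt32.le_iff_toNat_le] at h
  unfold pvDigit
  have : c.toNat = c.val.toNat := rfl
  omega

-- concatenating two single decimal digits as strings and parsing back = 10*t + o
theorem pvCat (t o : Int) (ht0 : 0 ≤ t) (ht9 : t ≤ 9) (ho0 : 0 ≤ o) (ho9 : o ≤ 9) :
    ((PySem.Int.ofStr? (PySem.Int.toStr t ++ PySem.Int.toStr o)).getD 0) = 10 * t + o := by
  interval_cases t <;> interval_cases o <;> decide

-- aLoop2 is a running max over the digit values
theorem aLoop2_eq_foldl (xs : List Char) (o : Int) :
    aLoop2 xs o = (xs.map pvDigit).foldl max o := by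
  induction xs generalizing o with
  | nil => simp [aLoop2]
  | cons c rest ih =>
      simp only [aLoop2, List.map, List.foldl]
      rw [ih]
      congr 1
      rcases lt_or_ge o (pvDigit c) with h | h
      · simp [h, max_eq_right (le_of_lt h)]
      · simp [not_lt.mpr h, max_eq_left h]

theorem foldl_max_le (xs : List Int) (a b : Int) (ha : a ≤ b) (hx : ∀ x ∈ xs, x ≤ b) :
    xs.foldl max a ≤ b := by
  induction xs generalizing a with
  | nil => simpa using ha
  | cons x rest ih =>
      simp only [List.foldl]
      exact ih _ (max_le ha (hx x (by simp))) (fun y hy => hx y (by simp [hy]))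

theorem le_foldl_max_init (xs : List Int) (a : Int) : a ≤ xs.foldl max a := by
  induction xs generalizing a with
  | nil => simp
  | cons x rest ih => exact le_trans (le_max_left a x) (ih _)

theorem le_foldl_max_mem (xs : List Int) (x : Int) (hx : x ∈ xs) :
    ∀ a : Int, x ≤ xs.foldl max a := by
  induction xs with
  | nil => cases hx
  | cons y rest ih =>
      intro a
      rcases List.mem_cons.mp hx with rfl | h
      · exact le_trans (le_max_right a x) (le_foldl_max_init _ _)
      · exact ih h _

theorem foldl_max_mem_or (xs : List Int) (a : Int) :
    xs.foldl max a = a ∨ xs.foldl max a ∈ xs := by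
  induction xs generalizing a with
  | nil => simp
  | cons x rest ih =>
      simp only [List.foldl]
      rcases ih (max a x) with h | h
      · rcases max_choice a x with hm | hm
        · left; rw [h, hm]
        · right; rw [h, hm]; simp
      · right; simp [h]

-- characterization of A's first loop on a list of digit characters:
-- the result is an upper bound, and (unless nothing updated) it is attained at index r.2,
-- with all strictly earlier digits strictly below it
def A1P (xs : List Char) (s t ti : Int) (r : Int × Int) : Prop :=
  (0 ≤ r.1 ∧ r.1 ≤ 9 ∧ t ≤ r.1) ∧ (∀ c ∈ xs, pvDigit c ≤ r.1) ∧
    ((r.1 = t ∧ r.2 = ti) ∨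
      ∃ k : Nat, k < xs.length ∧ t < r.1 ∧ r.2 = s + k ∧ pvDigit (xs.getD k ' ') = r.1 ∧
        ∀ m : Nat, m < k → pvDigit (xs.getD m ' ') < r.1)

theorem aLoop1_char (xs : List Char) (s t ti : Int)
    (hd : ∀ c ∈ xs, c.isDigit) (ht0 : 0 ≤ t) (ht9 : t ≤ 9) :
    A1P xs s t ti (aLoop1 (PySem.List.enumerate xs s) t ti) := by
  induction xs generalizing s t ti with
  | nil => simp [A1P, PySem.List.enumerate_nil, aLoop1, ht0, ht9]
  | cons c rest ih =>
      have hc : c.isDigit := hd c (by simp)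
      obtain ⟨hc0, hc9⟩ := pvDigit_of_isDigit hc
      have hrest : ∀ c' ∈ rest, c'.isDigit := fun c' h => hd c' (by simp [h])
      rw [PySem.List.enumerate_cons]
      by_cases h9 : pvDigit c = 9
      · by_cases hlt : t < pvDigit c
        · have hr : aLoop1 ((s, c) :: PySem.List.enumerate rest (s+1)) t ti = (pvDigit c, s) := by
            simp [aLoop1, h9]
            constructor <;> (intro h; omega)
          rw [hr]
          refine ⟨⟨hc0, hc9, le_of_lt hlt⟩, ?_, ?_⟩
          · intro c' hc'
            rcases List.mem_cons.mp hc' with rfl | h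
            · exact le_refl _
            · obtain ⟨_, h9'⟩ := pvDigit_of_isDigit (hrest c' h)
              simp; omega
          · right; exact ⟨0, by simp, hlt, by simp, by simp, by omega⟩
        · have hr : aLoop1 ((s, c) :: PySem.List.enumerate rest (s+1)) t ti = (t, ti) := by
            simp [aLoop1, h9]
            constructor <;> (intro h; omega)
          rw [hr]
          rw [not_lt] at hlt
          refine ⟨⟨ht0, ht9, le_refl t⟩, ?_, Or.inl ⟨rfl, rfl⟩⟩
          intro c' hc'
          rcases List.mem_cons.mp hc' with rfl | h
          · exact hlt
          · obtain ⟨_, h9'⟩ := pvDigit_of_isDigit (hrest c' h)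
            simp; omega
      · by_cases hlt : t < pvDigit c
        · have hr : aLoop1 ((s, c) :: PySem.List.enumerate rest (s+1)) t ti
              = aLoop1 (PySem.List.enumerate rest (s+1)) (pvDigit c) s := by
            simp [aLoop1, h9, hlt]
          rw [hr]
          obtain ⟨⟨h1, h2, h3⟩, h4, h5⟩ := ih (s + 1) (pvDigit c) s hrest hc0 hc9
          refine ⟨⟨h1, h2, by omega⟩, ?_, ?_⟩
          · intro c' hc'
            rcases List.mem_cons.mp hc' with rfl | h
            · exact h3
            · exact h4 c' h
          · rcases h5 with ⟨he, hti⟩ | ⟨k, hk, hst, hki, hkv, hkm⟩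
            · right
              exact ⟨0, by simp, by omega, by simp [hti], by simp [he], by omega⟩
            · right
              refine ⟨k + 1, by simp; omega, by omega, by rw [hki]; push_cast; ring,
                by simpa using hkv, ?_⟩
              intro m hm
              cases m with
              | zero => simp only [List.getD_cons_zero]; omega
              | succ m' =>
                  simp only [List.getD_cons_succ]
                  exact hkm m' (by omega)
        · have hr : aLoop1 ((s, c) :: PySem.List.enumerate rest (s+1)) t ti
              = aLoop1 (PySem.List.enumerate rest (s+1)) t ti := by
            simp [aLoop1, h9, hlt]
          rw [hr]
          obtain ⟨⟨h1, h2, h3⟩, h4, h5⟩ := ih (s + 1) t ti hrest ht0 ht9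
          rw [not_lt] at hlt
          refine ⟨⟨h1, h2, h3⟩, ?_, ?_⟩
          · intro c' hc'
            rcases List.mem_cons.mp hc' with rfl | h
            · omega
            · exact h4 c' h
          · rcases h5 with ⟨he, hti⟩ | ⟨k, hk, hst, hki, hkv, hkm⟩
            · left; exact ⟨he, hti⟩
            · right
              refine ⟨k + 1, by simp; omega, hst, by rw [hki]; push_cast; ring,
                by simpa using hkv, ?_⟩
              intro m hm
              cases m with
              | zero => simp only [List.getD_cons_zero]; omega
              | succ m' =>
                  simp only [List.getD_cons_succ]
                  exact hkm m' (by omega)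

-- the main case: length ≥ 2, all digits
theorem main_core (l : List Char) (h2 : 2 ≤ l.length) (hd : ∀ c ∈ l, c.isDigit) :
    aBody l = bBody l := by
  have hdl : l.dropLast.length = l.length - 1 := by simp
  have hdpre : ∀ c ∈ l.dropLast, c.isDigit := fun c hc => hd c (List.mem_of_mem_dropLast hc)
  obtain ⟨⟨ht0, ht9, -⟩, hub, hcase⟩ :=
    aLoop1_char l.dropLast 0 0 0 hdpre (le_refl 0) (by norm_num)
  set r := aLoop1 (PySem.List.enumerate l.dropLast 0) 0 0 with hr
  -- unified witness index for the first loop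
  have hK : ∃ k : Nat, k < l.length - 1 ∧ r.2 = (k : Int) ∧
      pvDigit (l.dropLast.getD k ' ') = r.1 ∧
      ∀ m : Nat, m < k → pvDigit (l.dropLast.getD m ' ') < r.1 := by
    rcases hcase with ⟨he, hti⟩ | ⟨k, hk, -, hki, hkv, hkm⟩
    · have h0 : 0 < l.dropLast.length := by omega
      have hmem : l.dropLast.getD 0 ' ' ∈ l.dropLast := by
        rw [List.getD_eq_getElem _ _ h0]; exact List.getElem_mem h0
      have hb1 := hub _ hmem
      have hb2 := (pvDigit_of_isDigit (hdpre _ hmem)).1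
      exact ⟨0, by omega, by simp [hti], by omega, by omega⟩
    · exact ⟨k, by omega, by simpa using hki, hkv, hkm⟩
  obtain ⟨k, hklt, hti, hkv, hkm⟩ := hK
  -- digits of l vs digits of the prefix bank[:-1]
  have hpg : ∀ i : Nat, i < l.length - 1 → l.dropLast.getD i ' ' = l.getD i ' ' := by
    intro i hi
    have hi' : i < l.dropLast.length := by omega
    rw [List.getD_eq_getElem _ _ hi', List.getD_eq_getElem _ _ (by omega)]
    simp [List.dropLast_eq_take]
  -- the second loop: running max over the suffix
  set o := ((l.drop (k+1)).map pvDigit).foldl max 0 with ho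
  have ho0 : 0 ≤ o := le_foldl_max_init _ _
  have hosub : ∀ c ∈ l.drop (k+1), pvDigit c ≤ o :=
    fun c hc => le_foldl_max_mem _ _ (List.mem_map_of_mem hc) 0
  have ho9 : o ≤ 9 := by
    refine foldl_max_le _ 0 9 (by norm_num) ?_
    intro x hx
    obtain ⟨c, hc, rfl⟩ := List.mem_map.mp hx
    exact (pvDigit_of_isDigit (hd c (List.drop_subset _ _ hc))).2
  have hdropmem : ∀ j : Nat, k < j → j < l.length → l.getD j ' ' ∈ l.drop (k+1) := by
    intro j hj1 hj2
    have hjlen : j - (k+1) < (l.drop (k+1)).length := by simp; omega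
    have he : (l.drop (k+1))[j - (k+1)]'hjlen = l.getD j ' ' := by
      rw [List.getD_eq_getElem _ _ (by omega)]
      rw [List.getElem_drop]
      congr 1; omega
    rw [← he]; exact List.getElem_mem hjlen
  have hoj : ∃ j : Nat, k < j ∧ j < l.length ∧ pvDigit (l.getD j ' ') = o := by
    rcases foldl_max_mem_or ((l.drop (k+1)).map pvDigit) 0 with h0 | hmem
    · refine ⟨k+1, by omega, by omega, ?_⟩
      have hm := hdropmem (k+1) (by omega) (by omega)
      have hle := hosub _ hm
      have hge := (pvDigit_of_isDigit (hd _ (List.drop_subset _ _ hm))).1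
      rw [← ho] at h0
      omega
    · rw [← ho] at hmem
      obtain ⟨c, hc, hcv⟩ := List.mem_map.mp hmem
      obtain ⟨m, hm, heq⟩ := List.mem_iff_getElem.mp hc
      have hmn : k + 1 + m < l.length := by
        have := hm; simp at this; omega
      refine ⟨k+1+m, by omega, hmn, ?_⟩
      have : l.getD (k+1+m) ' ' = c := by
        rw [List.getD_eq_getElem _ _ hmn, ← heq, List.getElem_drop]
      rw [this, hcv]
  -- value returned by A
  have hA : aBody l = 10 * r.1 + o := by
    simp only [aBody]
    rw [PySem.List.slice_to_neg_one, ← hr, hti]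
    rw [PySem.List.slice_from _ (by positivity : (0:Int) ≤ (k:Int) + 1)]
    have hc1 : ((k:Int) + 1).toNat = k + 1 := by omega
    rw [hc1, aLoop2_eq_foldl, ← ho]
    exact pvCat r.1 o ht0 ht9 ho0 ho9
  -- the pair list of B
  set vals := (List.range l.length).flatMap (fun i =>
    (List.range' (i + 1) (l.length - (i + 1))).map (fun j =>
      10 * pvDigit (l.getD i ' ') + pvDigit (l.getD j ' '))) with hvals
  have hvmem : ∀ v ∈ vals, ∃ i j : Nat, i < j ∧ j < l.length ∧
      v = 10 * pvDigit (l.getD i ' ') + pvDigit (l.getD j ' ') := by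
    intro v hv
    rw [hvals] at hv
    obtain ⟨i, hi, hv2⟩ := List.mem_flatMap.mp hv
    obtain ⟨j, hj, rfl⟩ := List.mem_map.mp hv2
    rw [List.mem_range] at hi
    rw [List.mem_range'_1] at hj
    exact ⟨i, j, by omega, by omega, rfl⟩
  have hvub : ∀ v ∈ vals, v ≤ 10 * r.1 + o := by
    intro v hv
    obtain ⟨i, j, hij, hjn, rfl⟩ := hvmem v hv
    have hi1 : i < l.length - 1 := by omega
    have hi' : i < l.dropLast.length := by omega
    have himem : l.dropLast.getD i ' ' ∈ l.dropLast := by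
      rw [List.getD_eq_getElem _ _ hi']; exact List.getElem_mem hi'
    have hile : pvDigit (l.getD i ' ') ≤ r.1 := by
      rw [← hpg i hi1]; exact hub _ himem
    have hjd : pvDigit (l.getD j ' ') ≤ 9 := by
      have hj' : j < l.length := hjn
      have : l.getD j ' ' ∈ l := by
        rw [List.getD_eq_getElem _ _ hj']; exact List.getElem_mem hj'
      exact (pvDigit_of_isDigit (hd _ this)).2
    by_cases heq : pvDigit (l.getD i ' ') = r.1
    · have hkj : k < j := by
        by_contra hle
        have him : i < k := by omega
        have hx := hkm i him
        rw [hpg i (by omega)] at hx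
        omega
      have := hosub _ (hdropmem j hkj hjn)
      omega
    · omega
  have hvin : (10 * r.1 + o) ∈ vals := by
    obtain ⟨j, hkj, hjn, hjv⟩ := hoj
    rw [hvals]
    refine List.mem_flatMap.mpr ⟨k, List.mem_range.mpr (by omega), ?_⟩
    refine List.mem_map.mpr ⟨j, List.mem_range'_1.mpr ⟨by omega, by omega⟩, ?_⟩
    have hkd : pvDigit (l.getD k ' ') = r.1 := by rw [← hpg k hklt]; exact hkv
    rw [hkd, hjv]
  -- value returned by B
  have hB : bBody l = 10 * r.1 + o := by
    simp only [bBody]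
    rw [← hvals]
    rcases hvv : vals with _ | ⟨v, vs⟩
    · rw [hvv] at hvin; cases hvin
    · have hub' : vs.foldl max v ≤ 10 * r.1 + o := by
        refine foldl_max_le _ _ _ (hvub v (by rw [hvv]; simp)) ?_
        intro x hx
        exact hvub x (by rw [hvv]; simp [hx])
      have hlb : 10 * r.1 + o ≤ vs.foldl max v := by
        rw [hvv] at hvin
        rcases List.mem_cons.mp hvin with he | hm
        · rw [he]; exact le_foldl_max_init _ _
        · exact le_foldl_max_mem _ _ hm v
      change vs.foldl max v = 10 * r.1 + o
      omega
  rw [hA, hB]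

theorem main_list (l : List Char) (h : l.length < 2 ∨ ∀ c ∈ l, c.isDigit) :
    aBody l = bBody l := by
  by_cases h2 : 2 ≤ l.length
  · refine main_core l h2 ?_
    rcases h with h | h
    · omega
    · exact h
  · rcases l with _ | ⟨c, _ | ⟨c2, rest⟩⟩
    · decide
    · simp [aBody, bBody, PySem.List.slice_to_neg_one, PySem.List.enumerate_nil, aLoop1]
      rw [PySem.List.slice_from _ (by norm_num : (0:Int) ≤ 1)]
      simp [aLoop2]
      decide
    · simp at h2

-- ===== VERDICT (by name: the statement is the Claim_ definition above) =====
theorem bank_joltage_spec : Claim_equal_bank_joltage := by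
  intro bank _ hpre
  unfold Spec_bank_joltage
  rw [bank_joltage_eq_aBody, bank_joltage_alt_eq_bBody]
  refine main_list bank.toList ?_
  rcases hpre with h | h
  · exact Or.inl h
  · refine Or.inr ?_
    rw [PySem.Str.strIsdigit_eq] at h
    simp only [PySem.Chars.strIsdigit, Bool.and_eq_true, List.all_eq_true] at h
    intro c hc
    have := h.2 c hc
    simp only [PySem.Chars.isdigit, Bool.and_eq_true, decide_eq_true_eq] at this
    simp [Char.isDigit, UInt32.le_iff_toNat_le]
    exact ⟨this.1, this.2⟩
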